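-- pv_equiv track=rewrite | github.com/Ristani/Codewars-Katas | kyu-05/directions-reduction.py | dir_reduce
-- ===== SOURCE A (Python) =====
-- def dir_reduce(arr):
--     # Stores a dictionary of directions and their opposites.
--     rev_dir = {"NORTH": "SOUTH", "SOUTH": "NORTH", "WEST": "EAST", "EAST": "WEST"}
--     # Creates an empty results list.
--     result = []
--     # For each direction passed.
--     for i in arr:
--         # If the current iterate is the opposite of the last stored result.
--         if result and rev_dir[i] == result[-1]:
--             # Remove it.
--             result.pop()
--         # Otherwise.
--         else:
--             # Add it.
--             result.append(i)
--     # Return the string of reduced directions.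
--     return result
-- ===== SOURCE B (Python) =====
-- def dir_reduce(arr):
--     rev_dir = {"NORTH": "SOUTH", "SOUTH": "NORTH", "WEST": "EAST", "EAST": "WEST"}
--     arr = list(arr)
--     changed = True
--     while changed:
--         changed = False
--         i = 0
--         while i + 1 < len(arr):
--             if rev_dir[arr[i]] == arr[i + 1]:
--                 del arr[i:i + 2]
--                 changed = True
--             else:
--                 i += 1
--     return arr
-- ===== Notes on version B (the rewrite author's own statement) =====
-- stated objective: alternative
-- what changed: replaces A's single-pass stack reduction by repeated full scans that delete adjacent opposite pairs until a whole pass finds none (cancellation is confluent, so the normal form is the same)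
-- outside the precondition, e.g. on dir_reduce(['NORTH', 'SOUTH', 'X']): A returns ['X'], B returns ['X']; on dir_reduce(['NORTH', 'X']): A raises KeyError, B returns ['NORTH', 'X']; on dir_reduce(['X', 'NORTH', 'SOUTH']): A returns ['X'], B raises KeyError
import Mathlib
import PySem

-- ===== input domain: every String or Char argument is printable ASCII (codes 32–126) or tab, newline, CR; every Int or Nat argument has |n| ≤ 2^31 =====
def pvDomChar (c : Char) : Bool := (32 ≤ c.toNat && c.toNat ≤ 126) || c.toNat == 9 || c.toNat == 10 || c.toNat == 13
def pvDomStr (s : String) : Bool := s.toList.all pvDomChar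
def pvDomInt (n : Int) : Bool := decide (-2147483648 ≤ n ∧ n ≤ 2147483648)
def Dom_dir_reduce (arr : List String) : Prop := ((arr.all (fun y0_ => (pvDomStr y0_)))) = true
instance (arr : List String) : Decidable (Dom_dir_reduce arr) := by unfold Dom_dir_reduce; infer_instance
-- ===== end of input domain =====

-- B replaces A's single-pass stack by repeated scans deleting adjacent opposite pairs until a
-- pass finds none (objective: alternative decomposition; same fully reduced result).

-- ===== PORT A =====
-- rev_dir lookup (shared table of opposite directions; none where Python's dict raises KeyError)
def pvRev? (s : String) : Option String :=
  if s = "NORTH" then some "SOUTH"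
  else if s = "SOUTH" then some "NORTH"
  else if s = "WEST" then some "EAST"
  else if s = "EAST" then some "WEST"
  else none

-- one iteration of A's for-loop: pop the last result on an opposite, else append
def pvStep (result : List String) (i : String) : List String :=
  if result ≠ [] ∧ pvRev? i = result.getLast? then result.dropLast else result ++ [i]

def dir_reduce (arr : List String) : List String :=
  arr.foldl pvStep []

-- ===== PORT B =====
-- 'rev_dir[arr[i]] == arr[i+1]'; a missing key (Python's KeyError, outside Pre_) compares unequal
def pvOpp (a b : String) : Bool :=
  match pvRev? a with
  | some r => r == b
  | none => false

-- B's inner while-loop: one left-to-right scan deleting adjacent opposite pairs;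
-- the Bool is B's 'changed' flag
def pvPass : List String → List String × Bool
  | [] => ([], false)
  | [a] => ([a], false)
  | a :: b :: rest =>
    if pvOpp a b then ((pvPass rest).1, true)
    else (a :: (pvPass (b :: rest)).1, (pvPass (b :: rest)).2)
  termination_by l => l.length

-- length facts about pvPass, needed for pvOuter's termination
theorem pvPass_len (l : List String) :
    (pvPass l).1.length ≤ l.length ∧ ((pvPass l).2 = true → (pvPass l).1.length < l.length) := by
  induction l using pvPass.induct with
  | case1 => simp [pvPass]
  | case2 a => simp [pvPass]
  | case3 a b rest h ih =>
      simp only [pvPass, h, if_true]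
      obtain ⟨ih1, -⟩ := ih
      refine ⟨?_, fun _ => ?_⟩ <;> (simp only [List.length_cons] at *; omega)
  | case4 a b rest h ih =>
      simp only [pvPass]
      rw [if_neg h]
      obtain ⟨ih1, ih2⟩ := ih
      refine ⟨?_, fun hc => ?_⟩
      · simp only [List.length_cons] at *; omega
      · simp only at hc
        have := ih2 hc
        simp only [List.length_cons] at *; omega

-- B's outer while-changed loop
def pvOuter (l : List String) : List String :=
  if (pvPass l).2 then pvOuter (pvPass l).1 else (pvPass l).1
  termination_by l.length
  decreasing_by exact (pvPass_len l).2 (by assumption)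

def dir_reduce_alt (arr : List String) : List String :=
  pvOuter arr

-- ===== PRECONDITION & SPEC =====
-- Pre_ excludes lists containing a non-direction string: on almost all such lists A (and B)
-- raises KeyError, and in the rare corner where one of them still returns (an invalid element
-- met only with an empty stack / only in the last position) the two raise or return at
-- different points of their scans — see the cites. Lists of length ≤ 1 never trigger a
-- lookup in either program and are kept inside Pre_.
def Pre_dir_reduce (arr : List String) : Prop :=
  arr.length ≤ 1 ∨ ∀ s ∈ arr, s = "NORTH" ∨ s = "SOUTH" ∨ s = "EAST" ∨ s = "WEST"
instance (arr : List String) : Decidable (Pre_dir_reduce arr) := by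
  unfold Pre_dir_reduce; infer_instance

def pvWitness_dir_reduce : List String := ["NORTH", "WEST", "EAST", "SOUTH", "EAST"]

def Spec_dir_reduce (arr : List String) (out : List String) : Prop := out = dir_reduce_alt arr
instance (arr : List String) (out : List String) : Decidable (Spec_dir_reduce arr out) := by
  unfold Spec_dir_reduce; infer_instance

-- ===== CLAIM (what is proved, stated in full; the proofs are below) =====
def Claim_equal_dir_reduce : Prop :=
  ∀ (arr : List String), Dom_dir_reduce arr → Pre_dir_reduce arr → Spec_dir_reduce arr (dir_reduce arr)

-- ===== LEMMAS AND PROOFS =====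

-- irreducibility: no adjacent opposite pair
def pvNp (a b : String) : Prop := pvOpp a b = false

theorem pvRev?_symm {a b : String} (h : pvRev? a = some b) : pvRev? b = some a := by
  unfold pvRev? at h ⊢
  split_ifs at h <;> simp_all <;> subst h <;> simp

theorem pvOpp_iff {a b : String} : pvOpp a b = true ↔ pvRev? a = some b := by
  unfold pvOpp
  cases h : pvRev? a <;> simp

theorem pvNp_of_not_rev {a b : String} (h : pvRev? b ≠ some a) : pvNp a b := by
  unfold pvNp
  cases hab : pvOpp a b
  · rfl
  · exact absurd (pvRev?_symm (pvOpp_iff.mp hab)) h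

-- convenient unfoldings of pvStep
theorem pvStep_pop {res : List String} {a : String} (h1 : res ≠ [])
    (h2 : pvRev? a = res.getLast?) : pvStep res a = res.dropLast := by
  simp [pvStep, h1, h2]

theorem pvStep_push {res : List String} {a : String}
    (h : ¬ (res ≠ [] ∧ pvRev? a = res.getLast?)) : pvStep res a = res ++ [a] := by
  rw [pvStep, if_neg h]

-- a chain gives the relation on the last two elements
theorem pvChain_last_pair {R : String → String → Prop} {l : List String} {x y : String}
    (h : List.IsChain R (l ++ [x, y])) : R x y :=
  (List.isChain_cons_cons.mp h.right_of_append).1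

-- processing two opposites over an irreducible stack is the identity
theorem pvStep_pair {res : List String} {a b : String}
    (hc : List.IsChain pvNp res) (hab : pvOpp a b = true) :
    pvStep (pvStep res a) b = res := by
  have hab' : pvRev? a = some b := pvOpp_iff.mp hab
  have hba : pvRev? b = some a := pvRev?_symm hab'
  by_cases hne : res = []
  · subst hne
    simp [pvStep, hba]
  by_cases hpop : pvRev? a = res.getLast?
  · -- first step pops the last element t; t = b, and the second step pushes b back
    have hget : res.getLast? = some (res.getLast hne) := List.getLast?_eq_some_getLast hne
    have hb : res.getLast hne = b := by
      rw [hget, hab'] at hpop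
      exact (Option.some_inj.mp hpop).symm
    have hres : res.dropLast ++ [res.getLast hne] = res := List.dropLast_append_getLast hne
    rw [pvStep_pop hne hpop]
    by_cases hdne : res.dropLast = []
    · rw [pvStep_push (by simp [hdne]), hdne]
      rw [hdne, hb] at hres
      simpa using hres
    · have hdget : res.dropLast.getLast? = some (res.dropLast.getLast hdne) :=
        List.getLast?_eq_some_getLast hdne
      have hnopop : ¬ (res.dropLast ≠ [] ∧ pvRev? b = res.dropLast.getLast?) := by
        rintro ⟨-, hdl⟩
        rw [hba, hdget] at hdl
        have ha : res.dropLast.getLast hdne = a := (Option.some_inj.mp hdl).symm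
        have hsplit : res.dropLast.dropLast ++
            [res.dropLast.getLast hdne, res.getLast hne] = res := by
          rw [show res.dropLast.dropLast ++ [res.dropLast.getLast hdne, res.getLast hne]
              = (res.dropLast.dropLast ++ [res.dropLast.getLast hdne]) ++ [res.getLast hne] by
                simp,
            List.dropLast_append_getLast hdne, hres]
        have hpair : pvNp (res.dropLast.getLast hdne) (res.getLast hne) :=
          pvChain_last_pair (hsplit ▸ hc)
        rw [ha, hb] at hpair
        exact absurd hab (by simpa [pvNp] using hpair)
      rw [pvStep_push hnopop, ← hb, hres]
  · -- first step pushes a, the second pops it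
    have h1 : pvStep res a = res ++ [a] := pvStep_push fun hcon => hpop hcon.2
    rw [h1, pvStep_pop (by simp) (by rw [hba, List.getLast?_concat]), List.dropLast_concat]

-- pvStep preserves irreducibility
theorem pvStep_chain {res : List String} (a : String) (hc : List.IsChain pvNp res) :
    List.IsChain pvNp (pvStep res a) := by
  by_cases hpop : res ≠ [] ∧ pvRev? a = res.getLast?
  · rw [pvStep_pop hpop.1 hpop.2]
    exact hc.prefix (List.dropLast_prefix res)
  · rw [pvStep_push hpop]
    refine List.isChain_append.mpr ⟨hc, List.isChain_singleton a, ?_⟩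
    intro x hx y hy
    simp only [List.head?_cons, Option.mem_def, Option.some_inj] at hy
    subst hy
    have hne : res ≠ [] := by
      intro h; subst h; simp at hx
    refine pvNp_of_not_rev fun hrev => hpop ⟨hne, ?_⟩
    rw [hrev, hx]

-- one pass of B does not change A's reduction
theorem pvPass_foldl (l : List String) :
    ∀ res, List.IsChain pvNp res →
      List.foldl pvStep res (pvPass l).1 = List.foldl pvStep res l := by
  induction l using pvPass.induct with
  | case1 => intro res _; simp [pvPass]
  | case2 a => intro res _; simp [pvPass]
  | case3 a b rest h ih =>
      intro res hc
      simp only [pvPass, h, if_true]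
      rw [ih res hc]
      simp only [List.foldl_cons]
      rw [pvStep_pair hc h]
  | case4 a b rest h ih =>
      intro res hc
      simp only [pvPass]
      rw [if_neg h]
      simp only [List.foldl_cons]
      exact ih (pvStep res a) (pvStep_chain a hc)

-- an unchanged pass keeps the list and witnesses irreducibility
theorem pvPass_fix (l : List String) (h : (pvPass l).2 = false) :
    (pvPass l).1 = l ∧ List.IsChain pvNp l := by
  induction l using pvPass.induct with
  | case1 => simp [pvPass]
  | case2 a => exact ⟨by simp [pvPass], List.isChain_singleton a⟩
  | case3 a b rest hopp ih => simp [pvPass, hopp] at h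
  | case4 a b rest hopp ih =>
      simp only [pvPass] at h ⊢
      rw [if_neg hopp] at h ⊢
      obtain ⟨h1, h2⟩ := ih h
      refine ⟨by rw [h1], List.isChain_cons_cons.mpr ⟨?_, h2⟩⟩
      simpa [pvNp] using hopp

-- A leaves an irreducible list unchanged
theorem pvFoldl_irred (l : List String) :
    ∀ res, List.IsChain pvNp (res ++ l) → List.foldl pvStep res l = res ++ l := by
  induction l with
  | nil => intro res _; simp
  | cons a rest ih =>
      intro res hc
      have hstep : pvStep res a = res ++ [a] := by
        refine pvStep_push ?_
        rintro ⟨hne, hlast⟩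
        have hget : res.getLast? = some (res.getLast hne) := List.getLast?_eq_some_getLast hne
        rw [hget] at hlast
        have hsplit : res.dropLast ++ (res.getLast hne :: a :: rest) = res ++ a :: rest := by
          rw [show res.dropLast ++ (res.getLast hne :: a :: rest)
              = (res.dropLast ++ [res.getLast hne]) ++ a :: rest by simp,
            List.dropLast_append_getLast hne]
        have hpair : pvNp (res.getLast hne) a :=
          (List.isChain_cons_cons.mp (hsplit ▸ hc).right_of_append).1
        have : pvOpp (res.getLast hne) a = true :=
          pvOpp_iff.mpr (pvRev?_symm hlast)
        exact absurd this (by simpa [pvNp] using hpair)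
      rw [List.foldl_cons, hstep, ih (res ++ [a]) (by simpa using hc)]
      simp

-- B's fixpoint equals A's stack reduction
theorem pvOuter_eq (l : List String) : pvOuter l = List.foldl pvStep [] l := by
  rw [pvOuter]
  by_cases h : (pvPass l).2 = true
  · rw [if_pos h, pvOuter_eq (pvPass l).1]
    exact pvPass_foldl l [] List.isChain_nil
  · rw [if_neg h]
    obtain ⟨h1, h2⟩ := pvPass_fix l (by simpa using h)
    rw [h1, pvFoldl_irred l [] (by simpa using h2)]
    simp
  termination_by l.length
  decreasing_by exact (pvPass_len l).2 (by assumption)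

-- ===== VERDICT (by name: the statement is the Claim_ definition above) =====
theorem dir_reduce_spec : Claim_equal_dir_reduce := by
  intro arr _ _
  unfold Spec_dir_reduce dir_reduce dir_reduce_alt
  exact (pvOuter_eq arr).symm
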